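-- pv_equiv track=rewrite | github.com/Belousovnm/NC | NC.py | ss4iss
-- ===== SOURCE A (Python) =====
-- def ss4iss(foo):
--     inpt = str(foo).split('+')
--     out = []
--     for x in inpt:
--         w = x.split('-')
--         for y in w:
--             out.append(y)
--     if out[0] == '':
--         out.pop(0)
--     return out
-- ===== SOURCE B (Python) =====
-- def ss4iss(foo):
--     s = str(foo)
--     out = []
--     cur = ''
--     for ch in s:
--         if ch == '+' or ch == '-':
--             out.append(cur)
--             cur = ''
--         else:
--             cur += ch
--     out.append(cur)
--     if out[0] == '':
--         out.pop(0)
--     return out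
-- ===== Notes on version B (the rewrite author's own statement) =====
-- stated objective: idiomatic
-- what changed: Replaced the two-level split('+') / split('-') flattening with a single-pass character tokenizer that accumulates the current token and emits on either delimiter.
import Mathlib
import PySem

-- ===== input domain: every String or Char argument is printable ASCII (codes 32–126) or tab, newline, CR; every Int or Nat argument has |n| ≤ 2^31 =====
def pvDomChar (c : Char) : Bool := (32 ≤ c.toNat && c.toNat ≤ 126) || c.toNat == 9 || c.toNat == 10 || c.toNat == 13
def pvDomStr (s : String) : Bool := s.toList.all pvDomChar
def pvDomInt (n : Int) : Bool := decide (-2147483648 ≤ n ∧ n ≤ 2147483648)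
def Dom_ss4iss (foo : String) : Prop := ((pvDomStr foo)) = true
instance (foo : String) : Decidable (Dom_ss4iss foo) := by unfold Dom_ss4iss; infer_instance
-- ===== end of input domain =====

-- B replaces A's two-level split('+')/split('-') flattening by a one-pass character tokenizer (idiomatic; same cost).

-- ===== PORT A =====
-- str(foo) = foo for a string argument; foo.split('+') with its nonempty literal separator
-- is exactly PySem.Chars.splitOn on the code points (PySem.Str.split? = some of this for sep ≠ "").
def ss4iss (foo : String) : List String :=
  let inpt : List String := (PySem.Chars.splitOn foo.toList ['+']).map String.ofList
  -- the two nested for-loops append every y of every x.split('-') to out, in order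
  let out : List String :=
    inpt.foldl (fun out x => out ++ (PySem.Chars.splitOn x.toList ['-']).map String.ofList) []
  -- out is never empty (split always yields ≥ 1 piece), so out[0] is out.head? and pop(0) is drop 1
  if out.head? == some "" then out.drop 1 else out

-- ===== PORT B =====
-- single-pass tokenizer: cur (a Python str) is carried as its list of code points
def ss4iss_alt (foo : String) : List String :=
  let p : List String × List Char :=
    foo.toList.foldl
      (fun st ch =>
        if ch = '+' ∨ ch = '-' then (st.1 ++ [String.ofList st.2], []) else (st.1, st.2 ++ [ch]))
      ([], [])
  let out : List String := p.1 ++ [String.ofList p.2]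
  if out.head? == some "" then out.drop 1 else out

-- ===== PRECONDITION & SPEC =====
def Spec_ss4iss (foo : String) (out : List String) : Prop := out = ss4iss_alt foo
instance (foo : String) (out : List String) : Decidable (Spec_ss4iss foo out) := by unfold Spec_ss4iss; infer_instance

-- ===== CLAIM (what is proved, stated in full; the proofs are below) =====
def Claim_equal_ss4iss : Prop := ∀ (foo : String), Dom_ss4iss foo → Spec_ss4iss foo (ss4iss foo)

-- ===== LEMMAS AND PROOFS =====

-- reference single-character split
def charSplit (c : Char) : List Char → List (List Char)
  | [] => [[]]
  | d :: rest => if d = c then [] :: charSplit c rest else (charSplit c rest).modifyHead (d :: ·)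

-- reference two-delimiter tokenizer
def tok2 : List Char → List (List Char)
  | [] => [[]]
  | d :: rest => if d = '+' ∨ d = '-' then [] :: tok2 rest else (tok2 rest).modifyHead (d :: ·)

theorem charSplit_ne_nil (c : Char) (l : List Char) : charSplit c l ≠ [] := by
  cases l with
  | nil => simp [charSplit]
  | cons d rest =>
    simp only [charSplit]
    split_ifs <;> simp [List.modifyHead_eq_nil_iff, charSplit_ne_nil c rest]

theorem tok2_ne_nil (l : List Char) : tok2 l ≠ [] := by
  cases l with
  | nil => simp [tok2]
  | cons d rest =>
    simp only [tok2]
    split_ifs <;> simp [List.modifyHead_eq_nil_iff, tok2_ne_nil rest]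

theorem go_single (c : Char) (l : List Char) : ∀ (fuel : Nat) (cur : List Char)
    (acc : List (List Char)), l.length < fuel →
    PySem.Chars.splitOn.go [c] fuel l cur acc
      = acc.reverse ++ (charSplit c l).modifyHead (cur.reverse ++ ·) := by
  induction l with
  | nil =>
    intro fuel cur acc h
    cases fuel with
    | zero => omega
    | succ f => simp [PySem.Chars.splitOn.go, charSplit]
  | cons d rest ih =>
    intro fuel cur acc h
    cases fuel with
    | zero => simp at h
    | succ f =>
      by_cases hdc : d = c
      · subst hdc
        have hpre : List.isPrefixOf [d] (d :: rest) = true := by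
          simp [List.isPrefixOf]
        rw [PySem.Chars.splitOn.go]
        simp only [hpre, if_true]
        have hf : rest.length < f := by simpa using h
        rw [show List.drop [d].length (d :: rest) = rest from rfl]
        rw [ih f [] (cur.reverse :: acc) hf]
        simp [charSplit]
        cases hcs : charSplit d rest with
        | nil => exact absurd hcs (charSplit_ne_nil d rest)
        | cons a as => simp
      · have hpre : List.isPrefixOf [c] (d :: rest) = false := by
          simp [List.isPrefixOf]
          exact fun hh => absurd hh.symm hdc
        rw [PySem.Chars.splitOn.go]
        simp only [hpre]
        have hf : rest.length < f := by simpa using h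
        rw [if_neg (by simp)]
        rw [ih f (d :: cur) acc hf]
        simp only [charSplit, if_neg hdc, List.modifyHead_modifyHead]
        cases hcs : charSplit c rest with
        | nil => exact absurd hcs (charSplit_ne_nil c rest)
        | cons a as => simp

theorem splitOn_single (c : Char) (l : List Char) :
    PySem.Chars.splitOn l [c] = charSplit c l := by
  unfold PySem.Chars.splitOn
  rw [go_single c l (l.length + 1) [] [] (by omega)]
  cases hcs : charSplit c l with
  | nil => exact absurd hcs (charSplit_ne_nil c l)
  | cons a as => simp

theorem modifyHead_append_left {α : Type} (f : α → α) (a : List α) (b : List α)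
    (h : a ≠ []) : (a ++ b).modifyHead f = a.modifyHead f ++ b := by
  cases a with
  | nil => exact absurd rfl h
  | cons x xs => simp

theorem flat_charSplit (l : List Char) :
    (charSplit '+' l).flatMap (fun x => charSplit '-' x) = tok2 l := by
  induction l with
  | nil => simp [charSplit, tok2]
  | cons d rest ih =>
    by_cases hp : d = '+'
    · subst hp
      simp only [charSplit, tok2]
      simp [charSplit, ih]
    · obtain ⟨a, as, hcs⟩ : ∃ a as, charSplit '+' rest = a :: as := by
        cases h : charSplit '+' rest with
        | nil => exact absurd h (charSplit_ne_nil '+' rest)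
        | cons a as => exact ⟨a, as, rfl⟩
      rw [hcs] at ih
      simp only [List.flatMap_cons] at ih
      simp only [charSplit, if_neg hp, hcs, List.modifyHead, List.flatMap_cons]
      by_cases hm : d = '-'
      · subst hm
        simp [tok2, ih]
      · simp only [tok2]
        rw [if_neg (by tauto)]
        rw [← ih, modifyHead_append_left _ _ _ (charSplit_ne_nil '-' a)]
        rw [if_neg (show ¬(d = '+' ∨ d = '-') by tauto)]
        cases hca : charSplit '-' a with
        | nil => exact absurd hca (charSplit_ne_nil '-' a)
        | cons b bs => simp

-- B's fold, characterized against tok2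
theorem alt_fold_spec (l : List Char) : ∀ (out : List String) (cur : List Char),
    (let p := l.foldl
        (fun st ch =>
          if ch = '+' ∨ ch = '-' then (st.1 ++ [String.ofList st.2], ([] : List Char))
          else (st.1, st.2 ++ [ch]))
        (out, cur)
     p.1 ++ [String.ofList p.2])
      = out ++ ((tok2 l).modifyHead (cur ++ ·)).map String.ofList := by
  induction l with
  | nil => intro out cur; simp [tok2]
  | cons d rest ih =>
    intro out cur
    by_cases hd : d = '+' ∨ d = '-'
    · simp only [List.foldl_cons, if_pos hd]
      rw [ih (out ++ [String.ofList cur]) []]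
      simp only [tok2, if_pos hd, List.modifyHead]
      cases ht : tok2 rest with
      | nil => exact absurd ht (tok2_ne_nil rest)
      | cons a as => simp
    · simp only [List.foldl_cons, if_neg hd]
      rw [ih out (cur ++ [d])]
      simp only [tok2, if_neg hd, List.modifyHead_modifyHead]
      cases ht : tok2 rest with
      | nil => exact absurd ht (tok2_ne_nil rest)
      | cons a as => simp

theorem ss4iss_pre_pop (foo : String) :
    ((PySem.Chars.splitOn foo.toList ['+']).map String.ofList).foldl
        (fun out x => out ++ (PySem.Chars.splitOn x.toList ['-']).map String.ofList) []
      = (tok2 foo.toList).map String.ofList := by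
  rw [splitOn_single]
  rw [PySem.List.foldl_append_eq_flatMap]
  rw [← flat_charSplit foo.toList, List.map_flatMap]
  simp [splitOn_single, List.flatMap_map, String.toList_ofList]

-- ===== VERDICT (by name: the statement is the Claim_ definition above) =====
theorem ss4iss_spec : Claim_equal_ss4iss := by
  intro foo _
  unfold Spec_ss4iss ss4iss ss4iss_alt
  simp only
  rw [ss4iss_pre_pop]
  rw [alt_fold_spec foo.toList [] []]
  cases ht : tok2 foo.toList with
  | nil => exact absurd ht (tok2_ne_nil _)
  | cons a as => simp
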